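-- pv_equiv track=rewrite | github.com/zfifteen/z-band-prime-prefilter | src/python/z_band_prime_predictor/simple_pgs_generator.py | visible_open_chain_offsets
-- ===== SOURCE A (Python) =====
-- from math import isqrt
--
-- DEFAULT_CANDIDATE_BOUND = 128
--
-- DEFAULT_CHAIN_LIMIT = 8
--
-- WHEEL_OPEN_RESIDUES_MOD30 = frozenset({1, 7, 11, 13, 17, 19, 23, 29})
--
-- def divisor_witness(n: int, max_divisor: int | None = None) -> int | None:
--     """Return a concrete divisor, when one is visible."""
--     if n < 2:
--         return 1
--     limit = isqrt(n) if max_divisor is None else min(isqrt(n), int(max_divisor))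
--     for divisor in range(2, limit + 1):
--         if n % divisor == 0:
--             return divisor
--     return None
--
-- def closure_reason(
--     p: int,
--     offset: int,
--     max_divisor: int | None = None,
-- ) -> str | None:
--     """Return a PGS-visible reason that p + offset is not a boundary."""
--     n = int(p) + int(offset)
--     residue = n % 30
--     if residue not in WHEEL_OPEN_RESIDUES_MOD30:
--         return f"wheel_closed_residue:{residue}"
--     witness = divisor_witness(n, max_divisor)
--     if witness is not None and witness not in {1, n}:
--         return f"divisor_witness:{witness}"
--     return None
--
-- def admissible_offsets(p: int, candidate_bound: int) -> list[int]:
--     """Return wheel-open boundary offsets inside the chamber."""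
--     return [
--         offset
--         for offset in range(1, int(candidate_bound) + 1)
--         if (int(p) + offset) % 30 in WHEEL_OPEN_RESIDUES_MOD30
--     ]
--
-- def visible_open_chain_offsets(
--     p: int,
--     seed_offset: int,
--     candidate_bound: int = DEFAULT_CANDIDATE_BOUND,
--     chain_limit: int = DEFAULT_CHAIN_LIMIT,
--     max_divisor: int | None = None,
-- ) -> list[int]:
--     """Return visible-open rightward chain offsets after one seed."""
--     offsets = admissible_offsets(int(p), int(candidate_bound))
--     chain: list[int] = []
--     current = int(seed_offset)
--     while len(chain) < int(chain_limit):
--         visible = [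
--             offset
--             for offset in offsets
--             if offset > current and closure_reason(int(p), offset, max_divisor) is None
--         ]
--         if not visible:
--             break
--         current = min(visible)
--         chain.append(current)
--     return chain
-- ===== SOURCE B (Python) =====
-- from math import isqrt
--
-- WHEEL_OPEN_RESIDUES_MOD30 = frozenset({1, 7, 11, 13, 17, 19, 23, 29})
--
--
-- def _visible_open(p: int, offset: int, max_divisor: int | None) -> bool:
--     """True iff p + offset is wheel-open and has no visible proper divisor."""
--     n = int(p) + int(offset)
--     if n % 30 not in WHEEL_OPEN_RESIDUES_MOD30:
--         return False
--     if n < 2: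
--         return True
--     limit = isqrt(n) if max_divisor is None else min(isqrt(n), int(max_divisor))
--     for divisor in range(2, limit + 1):
--         if n % divisor == 0:
--             return divisor in (1, n)
--     return True
--
--
-- def visible_open_chain_offsets(
--     p: int,
--     seed_offset: int,
--     candidate_bound: int = 128,
--     chain_limit: int = 8,
--     max_divisor: int | None = None,
-- ) -> list[int]:
--     """Single left-to-right scan: the chain is the first chain_limit
--     visible-open offsets greater than the seed, in increasing order."""
--     chain: list[int] = []
--     limit = int(chain_limit)
--     for offset in range(max(int(seed_offset) + 1, 1), int(candidate_bound) + 1):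
--         if len(chain) >= limit:
--             break
--         if _visible_open(int(p), offset, max_divisor):
--             chain.append(offset)
--     return chain
-- ===== Notes on version B (the rewrite author's own statement) =====
-- stated objective: faster
-- what changed: A rebuilds and re-filters the whole admissible-offset list on every chain step and takes min each time; B makes one left-to-right scan over the candidate range, testing each offset's openness once and collecting the first chain_limit open offsets greater than the seed.
import Mathlib
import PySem

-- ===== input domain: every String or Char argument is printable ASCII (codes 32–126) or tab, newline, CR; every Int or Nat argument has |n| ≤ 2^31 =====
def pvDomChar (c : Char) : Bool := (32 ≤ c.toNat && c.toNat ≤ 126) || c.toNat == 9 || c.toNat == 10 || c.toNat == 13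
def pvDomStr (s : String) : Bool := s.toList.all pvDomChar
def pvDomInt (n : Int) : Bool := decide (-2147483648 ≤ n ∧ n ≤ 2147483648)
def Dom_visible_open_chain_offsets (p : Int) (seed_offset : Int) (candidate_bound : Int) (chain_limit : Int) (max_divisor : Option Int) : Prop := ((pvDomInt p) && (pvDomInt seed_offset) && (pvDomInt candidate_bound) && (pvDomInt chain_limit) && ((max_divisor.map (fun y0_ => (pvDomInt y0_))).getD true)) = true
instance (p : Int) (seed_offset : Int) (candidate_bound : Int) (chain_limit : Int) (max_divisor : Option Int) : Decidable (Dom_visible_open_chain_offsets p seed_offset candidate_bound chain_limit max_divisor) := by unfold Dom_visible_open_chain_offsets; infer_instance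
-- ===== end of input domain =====

-- B replaces A's repeated filter-and-min chain loop by one left-to-right scan that tests each
-- offset's openness once and collects the first chain_limit open offsets greater than the seed (faster).


-- ===== PORT A =====

-- math.isqrt for nonnegative n; both ports only call it with n ≥ 2, where it is exact.
def pyIsqrt (n : Int) : Int := (Nat.sqrt n.toNat : Int)

-- WHEEL_OPEN_RESIDUES_MOD30 (membership test on a fixed 8-element set of small ints)
def wheelOpenResidues : List Int := [1, 7, 11, 13, 17, 19, 23, 29]

def divisor_witness (n : Int) (max_divisor : Option Int) : Option Int :=
  if n < 2 then some 1
  else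
    let limit : Int := match max_divisor with
      | none => pyIsqrt n
      | some m => min (pyIsqrt n) m
    -- for divisor in range(2, limit+1): if n % divisor == 0: return divisor;  return None
    (PySem.List.pyRange 2 (limit + 1) 1).find? (fun d => PySem.Int.mod n d == 0)

def closure_reason (p : Int) (offset : Int) (max_divisor : Option Int) : Option String :=
  let n := p + offset
  let residue := PySem.Int.mod n 30
  if wheelOpenResidues.contains residue then
    match divisor_witness n max_divisor with
    | some w => if w = 1 ∨ w = n then none else some ("divisor_witness:" ++ PySem.Int.toStr w)
    | none => none
  else some ("wheel_closed_residue:" ++ PySem.Int.toStr residue)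

def admissible_offsets (p : Int) (candidate_bound : Int) : List Int :=
  (PySem.List.pyRange 1 (candidate_bound + 1) 1).filter
    (fun o => wheelOpenResidues.contains (PySem.Int.mod (p + o) 30))

-- while len(chain) < chain_limit: …  — fuel = chain_limit - len(chain), decremented once per appended element
def chainLoopA (p : Int) (max_divisor : Option Int) (offsets : List Int) (current : Int) : Nat → List Int
  | 0 => []
  | Nat.succ fuel =>
    let visible := offsets.filter
      (fun o => decide (current < o) && (closure_reason p o max_divisor == none))
    match PySem.List.min? visible (fun x => x) with
    | none => []
    | some m => m :: chainLoopA p max_divisor offsets m fuel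

def visible_open_chain_offsets (p : Int) (seed_offset : Int) (candidate_bound : Int) (chain_limit : Int) (max_divisor : Option Int) : List Int :=
  chainLoopA p max_divisor (admissible_offsets p candidate_bound) seed_offset chain_limit.toNat

-- ===== PORT B =====

def altVisibleOpen (p : Int) (offset : Int) (max_divisor : Option Int) : Bool :=
  let n := p + offset
  if wheelOpenResidues.contains (PySem.Int.mod n 30) then
    if n < 2 then true
    else
      let limit : Int := match max_divisor with
        | none => pyIsqrt n
        | some m => min (pyIsqrt n) m
      match (PySem.List.pyRange 2 (limit + 1) 1).find? (fun d => PySem.Int.mod n d == 0) with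
      | some d => d == 1 || d == n
      | none => true
  else false

-- for offset in range(…): if len(chain) >= limit: break; if open: append
def altScan (p : Int) (max_divisor : Option Int) : Nat → List Int → List Int
  | _, [] => []
  | 0, _ :: _ => []
  | Nat.succ k, o :: rest =>
    if altVisibleOpen p o max_divisor then o :: altScan p max_divisor k rest
    else altScan p max_divisor (Nat.succ k) rest

def visible_open_chain_offsets_alt (p : Int) (seed_offset : Int) (candidate_bound : Int) (chain_limit : Int) (max_divisor : Option Int) : List Int :=
  altScan p max_divisor chain_limit.toNat
    (PySem.List.pyRange (max (seed_offset + 1) 1) (candidate_bound + 1) 1)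

-- ===== PRECONDITION & SPEC =====
def Spec_visible_open_chain_offsets (p : Int) (seed_offset : Int) (candidate_bound : Int) (chain_limit : Int) (max_divisor : Option Int) (out : List Int) : Prop := out = visible_open_chain_offsets_alt p seed_offset candidate_bound chain_limit max_divisor
instance (p : Int) (seed_offset : Int) (candidate_bound : Int) (chain_limit : Int) (max_divisor : Option Int) (out : List Int) : Decidable (Spec_visible_open_chain_offsets p seed_offset candidate_bound chain_limit max_divisor out) := by unfold Spec_visible_open_chain_offsets; infer_instance

-- ===== CLAIM (what is proved, stated in full; the proofs are below) =====
def Claim_equal_visible_open_chain_offsets : Prop := ∀ (p : Int) (seed_offset : Int) (candidate_bound : Int) (chain_limit : Int) (max_divisor : Option Int), Dom_visible_open_chain_offsets p seed_offset candidate_bound chain_limit max_divisor → Spec_visible_open_chain_offsets p seed_offset candidate_bound chain_limit max_divisor (visible_open_chain_offsets p seed_offset candidate_bound chain_limit max_divisor)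

-- ===== LEMMAS AND PROOFS =====

-- A's per-offset openness test (closure_reason is None) coincides with B's boolean test.
lemma closure_none_eq_altVisibleOpen (p o : Int) (md : Option Int) :
    (closure_reason p o md == none) = altVisibleOpen p o md := by
  unfold closure_reason altVisibleOpen divisor_witness
  by_cases hres : wheelOpenResidues.contains (PySem.Int.mod (p + o) 30) = true
  · rw [if_pos hres, if_pos hres]
    by_cases hn : p + o < 2
    · rw [if_pos hn, if_pos hn]
      rfl
    · rw [if_neg hn, if_neg hn]
      cases hf : (PySem.List.pyRange 2 ((match md with
          | none => pyIsqrt (p + o)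
          | some m => min (pyIsqrt (p + o)) m) + 1) 1).find? (fun d => PySem.Int.mod (p + o) d == 0) with
      | none => simp only [hf]; rfl
      | some d =>
        simp only [hf]
        by_cases h1 : d = 1 ∨ d = p + o
        · rw [if_pos h1]
          rcases h1 with h | h <;> simp [h]
        · rw [if_neg h1]
          have h2 : d ≠ 1 := fun h => h1 (Or.inl h)
          have h3 : d ≠ p + o := fun h => h1 (Or.inr h)
          simp [h2, h3]
  · rw [if_neg hres, if_neg hres]
    rfl

lemma altVisibleOpen_implies_residue (p o : Int) (md : Option Int)
    (h : altVisibleOpen p o md = true) :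
    wheelOpenResidues.contains (PySem.Int.mod (p + o) 30) = true := by
  by_cases hres : wheelOpenResidues.contains (PySem.Int.mod (p + o) 30) = true
  · exact hres
  · unfold altVisibleOpen at h
    rw [if_neg hres] at h
    exact absurd h (by simp)

lemma foldl_min_of_forall_le (x : Int) (t : List Int) (h : ∀ y ∈ t, x ≤ y) :
    t.foldl min x = x := by
  induction t with
  | nil => rfl
  | cons y t ih =>
    simp only [List.foldl_cons]
    rw [min_eq_left (h y (by simp))]
    exact ih (fun z hz => h z (by simp [hz]))

-- A's loop over a strictly increasing offset list takes the first `fuel` matching elements.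
lemma chainLoopA_eq_take (p : Int) (md : Option Int) (l : List Int)
    (hl : l.Pairwise (· < ·)) :
    ∀ (fuel : Nat) (current : Int),
      chainLoopA p md l current fuel =
        (l.filter (fun o => decide (current < o) && (closure_reason p o md == none))).take fuel := by
  intro fuel
  induction fuel with
  | zero => intro current; simp [chainLoopA]
  | succ fuel ih =>
    intro current
    rw [chainLoopA]
    cases hv : l.filter (fun o => decide (current < o) && (closure_reason p o md == none)) with
    | nil =>
      rw [show PySem.List.min? ([] : List Int) (fun x => x) = none from
        (PySem.List.min?_eq_none_iff _ _).mpr rfl]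
      rfl
    | cons m vs =>
      have hpw : (m :: vs).Pairwise (· < ·) := hv ▸ hl.filter _
      have hmvs : ∀ y ∈ vs, m < y := fun y hy => (List.pairwise_cons.mp hpw).1 y hy
      have hmin : PySem.List.min? (m :: vs) (fun x => x) = some m := by
        rw [PySem.List.min?_id_cons]
        rw [foldl_min_of_forall_le m vs (fun y hy => le_of_lt (hmvs y hy))]
      have hm_mem : m ∈ l.filter (fun o => decide (current < o) && (closure_reason p o md == none)) := by
        rw [hv]; simp
      have hcm : current < m := by
        have h := List.of_mem_filter hm_mem
        simp only [Bool.and_eq_true, decide_eq_true_eq] at h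
        exact h.1
      simp only [hmin]
      rw [ih m]
      congr 1
      -- l.filter (m < · && open) = vs
      have step1 : l.filter (fun o => decide (m < o) && (closure_reason p o md == none)) =
          (l.filter (fun o => decide (current < o) && (closure_reason p o md == none))).filter
            (fun o => decide (m < o)) := by
        rw [List.filter_filter]
        apply List.filter_congr
        intro o _
        by_cases hmo : m < o
        · have : current < o := lt_trans hcm hmo
          simp [hmo, this]
        · simp [hmo]
      rw [step1, hv]
      have hmm : decide (m < m) = false := by simp
      simp only [List.filter_cons, hmm, Bool.false_eq_true, if_false]
      have hvs : vs.filter (fun o => decide (m < o)) = vs :=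
        List.filter_eq_self.mpr (fun y hy => decide_eq_true (hmvs y hy))
      rw [hvs]

-- B's scan takes the first k elements passing the openness test.
lemma altScan_eq_take (p : Int) (md : Option Int) :
    ∀ (l : List Int) (k : Nat),
      altScan p md k l = (l.filter (fun o => altVisibleOpen p o md)).take k := by
  intro l
  induction l with
  | nil => intro k; cases k <;> simp [altScan]
  | cons o rest ih =>
    intro k
    cases k with
    | zero =>
      simp only [altScan]
      cases h : altVisibleOpen p o md <;> simp [h]
    | succ k =>
      rw [altScan]
      cases h : altVisibleOpen p o md with
      | true => simp [h, ih k]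
      | false => simp [h, ih (k + 1)]

-- the shifted range is the filtered full range
lemma pyRange_max_eq_filter (s b : Int) :
    PySem.List.pyRange (max (s + 1) 1) b 1 =
      (PySem.List.pyRange 1 b 1).filter (fun o => decide (s < o)) := by
  by_cases hs : s + 1 ≤ 1
  · rw [max_eq_right hs]
    symm
    apply List.filter_eq_self.mpr
    intro y hy
    have := (PySem.List.mem_pyRange_one).mp hy
    simp; omega
  · rw [max_eq_left (le_of_lt (lt_of_not_ge hs))]
    by_cases hb : b ≤ s + 1
    · rw [PySem.List.pyRange_one_eq_nil hb]
      symm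
      apply List.filter_eq_nil_iff.mpr
      intro y hy
      have := (PySem.List.mem_pyRange_one).mp hy
      simp; omega
    · have h1 : (1 : Int) ≤ s + 1 := by omega
      have h2 : s + 1 ≤ b := by omega
      rw [PySem.List.pyRange_one_append 1 (s + 1) b h1 h2, List.filter_append]
      have e1 : (PySem.List.pyRange 1 (s + 1) 1).filter (fun o => decide (s < o)) = [] := by
        apply List.filter_eq_nil_iff.mpr
        intro y hy
        have := (PySem.List.mem_pyRange_one).mp hy
        simp; omega
      have e2 : (PySem.List.pyRange (s + 1) b 1).filter (fun o => decide (s < o)) =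
          PySem.List.pyRange (s + 1) b 1 := by
        apply List.filter_eq_self.mpr
        intro y hy
        have := (PySem.List.mem_pyRange_one).mp hy
        simp; omega
      rw [e1, e2, List.nil_append]

-- ===== VERDICT (by name: the statement is the Claim_ definition above) =====
theorem visible_open_chain_offsets_spec : Claim_equal_visible_open_chain_offsets := by
  intro p seed_offset candidate_bound chain_limit max_divisor _
  unfold Spec_visible_open_chain_offsets
  unfold visible_open_chain_offsets visible_open_chain_offsets_alt
  have hpw : (admissible_offsets p candidate_bound).Pairwise (· < ·) := by
    unfold admissible_offsets
    exact (PySem.List.pairwise_lt_pyRange_one 1 (candidate_bound + 1)).filter _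
  rw [chainLoopA_eq_take p max_divisor _ hpw,
      altScan_eq_take p max_divisor,
      pyRange_max_eq_filter seed_offset (candidate_bound + 1)]
  congr 1
  unfold admissible_offsets
  rw [List.filter_filter, List.filter_filter]
  apply List.filter_congr
  intro o _
  rw [closure_none_eq_altVisibleOpen]
  cases h : altVisibleOpen p o max_divisor with
  | false => simp
  | true =>
    have hr := altVisibleOpen_implies_residue p o max_divisor h
    simp
    exact fun _ => by simpa using hr
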